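-- pv_equiv track=rewrite | github.com/JainyGandhi/2048game | main.py | merge_tiles_move_right
-- ===== SOURCE A (Python) =====
-- def merge_tiles_move_right(mat):
--     # Shifting tiles to the right
--     for i in range(4):
--         filtered = [num for num in mat[i] if num != 0]
--         filtered = [0] * (4 - len(filtered)) + filtered
--         mat[i] = filtered
--
--     # Merging tiles
--     for i in range(4):
--         for j in range(3, 0, -1):
--             if mat[i][j] == mat[i][j - 1] and mat[i][j] != 0:
--                 mat[i][j] *= 2
--                 mat[i][j - 1] = 0
--
--     # Shifting tiles to the right again
--     for i in range(4):
--         filtered = [num for num in mat[i] if num != 0]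
--         filtered = [0] * (4 - len(filtered)) + filtered
--         mat[i] = filtered
--
--     return mat
-- ===== SOURCE B (Python) =====
-- def merge_tiles_move_right(mat):
--     # One right-to-left pass per row with a "just merged" flag, instead of
--     # compact / merge / compact.  Rows are replaced in place (mat[i] = ...),
--     # like the original.
--     for i in range(4):
--         out = []  # tiles of the new row, rightmost first
--         merged = False
--         for num in reversed(mat[i]):
--             if num == 0:
--                 continue
--             if out and not merged and out[0] == num:
--                 out[0] = num * 2
--                 merged = True
--             else:
--                 out.insert(0, num)
--                 merged = False
--         mat[i] = [0] * (4 - len(out)) + out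
--     return mat
-- ===== Notes on version B (the rewrite author's own statement) =====
-- stated objective: alternative
-- what changed: Replaces A's three passes per row (compact right, merge adjacent pairs in the padded row, compact again) by one right-to-left scan over the row's nonzero tiles with a just-merged flag, padding once at the end.
import Mathlib
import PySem

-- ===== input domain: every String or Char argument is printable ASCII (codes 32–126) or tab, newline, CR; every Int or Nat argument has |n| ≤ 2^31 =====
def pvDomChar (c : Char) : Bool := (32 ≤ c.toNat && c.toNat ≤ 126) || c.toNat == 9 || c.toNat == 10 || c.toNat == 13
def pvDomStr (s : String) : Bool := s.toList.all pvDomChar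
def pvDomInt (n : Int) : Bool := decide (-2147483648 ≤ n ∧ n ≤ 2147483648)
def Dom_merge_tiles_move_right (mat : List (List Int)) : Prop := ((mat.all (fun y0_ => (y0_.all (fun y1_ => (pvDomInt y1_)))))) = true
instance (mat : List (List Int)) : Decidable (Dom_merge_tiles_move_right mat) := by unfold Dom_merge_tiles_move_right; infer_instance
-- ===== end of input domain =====

-- B replaces A's three passes per row (compact/merge/compact) by one right-to-left
-- scan of the nonzero tiles with a just-merged flag.  Both Pythons mutate mat's rows
-- in place identically (mat[i] = new row); the theorems are about the return value.

-- ===== PORT A =====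
def pvShiftRow (row : List Int) : List Int :=
  let filtered := row.filter (fun num => num != 0)
  List.replicate (4 - filtered.length) 0 ++ filtered

def pvMergeRow (row : List Int) : List Int :=
  (PySem.List.pyRange 3 0 (-1)).foldl (fun r j =>
    if PySem.List.pyGetD r j 0 = PySem.List.pyGetD r (j - 1) 0 ∧ PySem.List.pyGetD r j 0 ≠ 0 then
      (r.set j.toNat (PySem.List.pyGetD r j 0 * 2)).set (j - 1).toNat 0
    else r) row

def merge_tiles_move_right (mat : List (List Int)) : List (List Int) :=
  let m1 := (PySem.List.pyRange 0 4 1).foldl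
    (fun m i => m.set i.toNat (pvShiftRow (PySem.List.pyGetD m i []))) mat
  let m2 := (PySem.List.pyRange 0 4 1).foldl
    (fun m i => m.set i.toNat (pvMergeRow (PySem.List.pyGetD m i []))) m1
  (PySem.List.pyRange 0 4 1).foldl
    (fun m i => m.set i.toNat (pvShiftRow (PySem.List.pyGetD m i []))) m2

-- ===== PORT B =====
-- the fold state is (out, merged); out already in left-to-right order (insert(0, …) = cons)
def pvMergeStep (st : List Int × Bool) (num : Int) : List Int × Bool :=
  if num = 0 then st
  else
    match st with
    | (h :: t, false) => if h = num then (num * 2 :: t, true) else (num :: h :: t, false)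
    | (out, _) => (num :: out, false)

def pvMergeRight (row : List Int) : List Int :=
  let out := (row.reverse.foldl pvMergeStep ([], false)).1
  List.replicate (4 - out.length) 0 ++ out

def merge_tiles_move_right_alt (mat : List (List Int)) : List (List Int) :=
  (PySem.List.pyRange 0 4 1).foldl
    (fun m i => m.set i.toNat (pvMergeRight (PySem.List.pyGetD m i []))) mat

-- ===== PRECONDITION & SPEC =====
-- Pre_ excludes boards with fewer than 4 rows (A raises IndexError) and boards whose
-- first four rows hold more than four tiles — malformed for the 4×4 game, where A's
-- merge pass only touches the first four positions and leaves extra tiles unmerged.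
def Pre_merge_tiles_move_right (mat : List (List Int)) : Prop :=
  4 ≤ mat.length ∧ ∀ row ∈ mat.take 4, (row.filter (fun num => num != 0)).length ≤ 4
instance (mat : List (List Int)) : Decidable (Pre_merge_tiles_move_right mat) := by
  unfold Pre_merge_tiles_move_right; infer_instance

def pvWitness_merge_tiles_move_right : List (List Int) :=
  [[0, 2, 2, 0], [0, 0, 0, 2], [4, 4, 4, 4], [0, 0, 0, 0]]

def Spec_merge_tiles_move_right (mat : List (List Int)) (out : List (List Int)) : Prop := out = merge_tiles_move_right_alt mat
instance (mat : List (List Int)) (out : List (List Int)) : Decidable (Spec_merge_tiles_move_right mat out) := by unfold Spec_merge_tiles_move_right; infer_instance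

-- ===== CLAIM (what is proved, stated in full; the proofs are below) =====
def Claim_equal_merge_tiles_move_right : Prop := ∀ (mat : List (List Int)), Dom_merge_tiles_move_right mat → Pre_merge_tiles_move_right mat → Spec_merge_tiles_move_right mat (merge_tiles_move_right mat)

-- ===== LEMMAS AND PROOFS =====
theorem pvRange04 : PySem.List.pyRange 0 4 1 = [0, 1, 2, 3] := by decide

theorem pvRange30 : PySem.List.pyRange 3 0 (-1) = [3, 2, 1] := by decide

-- skipping zeros in the fold = folding over the filtered list
theorem pvFoldFilter (l : List Int) (st : List Int × Bool) :
    l.foldl pvMergeStep st = (l.filter (fun num => num != 0)).foldl pvMergeStep st := by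
  induction l generalizing st with
  | nil => rfl
  | cons x xs ih =>
    by_cases hx : x = 0
    · subst hx; simpa [pvMergeStep] using ih st
    · simp [hx, ih]

-- core per-row fact on the zero-free tile list f (length ≤ 4)
theorem pvCore (f : List Int) (hlen : f.length ≤ 4) (hnz : ∀ x ∈ f, x ≠ 0) :
    pvShiftRow (pvMergeRow (List.replicate (4 - f.length) 0 ++ f)) =
      List.replicate (4 - ((f.reverse.foldl pvMergeStep ([], false)).1).length) 0 ++
        (f.reverse.foldl pvMergeStep ([], false)).1 := by
  match f, hlen with
  | [], _ => decide
  | [a], _ =>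
    have ha := hnz a (by simp)
    simp [pvMergeRow, pvShiftRow, pvRange30, pvMergeStep, PySem.List.pyGetD_ofNat', ha]
  | [a, b], _ =>
    have ha := hnz a (by simp); have hb := hnz b (by simp)
    rcases eq_or_ne a b with hab | hab <;> subst_vars <;>
      simp_all [pvMergeRow, pvShiftRow, pvRange30, pvMergeStep, PySem.List.pyGetD_ofNat',
        Ne.symm]
  | [a, b, c], _ =>
    have ha := hnz a (by simp); have hb := hnz b (by simp); have hc := hnz c (by simp)
    rcases eq_or_ne a b with hab | hab <;> rcases eq_or_ne b c with hbc | hbc <;>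
      subst_vars <;>
      simp_all [pvMergeRow, pvShiftRow, pvRange30, pvMergeStep, PySem.List.pyGetD_ofNat',
        Ne.symm]
  | [a, b, c, d], _ =>
    have ha := hnz a (by simp); have hb := hnz b (by simp)
    have hc := hnz c (by simp); have hd := hnz d (by simp)
    rcases eq_or_ne a b with hab | hab <;> rcases eq_or_ne b c with hbc | hbc <;>
      rcases eq_or_ne c d with hcd | hcd <;> subst_vars <;>
      simp_all [pvMergeRow, pvShiftRow, pvRange30, pvMergeStep, PySem.List.pyGetD_ofNat',
        Ne.symm]

theorem pvPass (g : List Int → List Int) (a b c d : List Int) (t : List (List Int)) :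
    ([0, 1, 2, 3] : List Int).foldl
        (fun m i => m.set i.toNat (g (PySem.List.pyGetD m i []))) (a :: b :: c :: d :: t) =
      g a :: g b :: g c :: g d :: t := by
  simp [PySem.List.pyGetD_ofNat', List.getD]

theorem pvRowEq (row : List Int) (h : (row.filter (fun num => num != 0)).length ≤ 4) :
    pvShiftRow (pvMergeRow (pvShiftRow row)) = pvMergeRight row := by
  have hnz : ∀ x ∈ row.filter (fun num => num != 0), x ≠ 0 := by
    intro x hx
    have := List.of_mem_filter hx
    simpa using this
  rw [pvMergeRight, pvFoldFilter, List.filter_reverse]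
  rw [pvShiftRow]
  exact pvCore _ h hnz

-- ===== VERDICT (by name: the statement is the Claim_ definition above) =====
theorem merge_tiles_move_right_spec : Claim_equal_merge_tiles_move_right := by
  intro mat _ hpre
  obtain ⟨h4, hrows⟩ := hpre
  match mat, h4 with
  | a :: b :: c :: d :: t, _ =>
    have ha := hrows a (by simp)
    have hb := hrows b (by simp)
    have hc := hrows c (by simp)
    have hd := hrows d (by simp)
    show merge_tiles_move_right _ = merge_tiles_move_right_alt _
    simp only [merge_tiles_move_right, merge_tiles_move_right_alt, pvRange04]
    rw [pvPass, pvPass, pvPass, pvPass, pvRowEq a ha, pvRowEq b hb, pvRowEq c hc,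
      pvRowEq d hd]
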